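-- pv_equiv track=rewrite | github.com/Ax31R0d/Lotery | Lotery_final.py | obtener_siguiente_caidas
-- ===== SOURCE A (Python) =====
-- def obtener_historial_caidas(columnas):
--
--     caidas_columna = []
--     ultimas_posiciones = [-1] * 10
--     for i, valor in enumerate(columnas):
--         if ultimas_posiciones[valor] == -1:
--             jugadas = i + 1
--         else:
--             jugadas = i - ultimas_posiciones[valor]
--         if jugadas > 40:
--             jugadas = 40 if jugadas % 2 == 0 else 39
--         caidas_columna.append(jugadas)
--         ultimas_posiciones[valor] = i
--     return caidas_columna
--
-- def obtener_siguiente_caidas(columnas):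
--     siguiente_caidas = []
--     caidas = obtener_historial_caidas(columnas)
--     ultima_caida = caidas[-1]
--     for i in range(len(caidas) - 1):
--         if caidas[i] == ultima_caida:
--             siguiente = min(caidas[i + 1], 40)
--             siguiente_caidas.append(siguiente)
--     return siguiente_caidas
-- ===== SOURCE B (Python) =====
-- def obtener_historial_caidas(columnas):
--
--     caidas_columna = []
--     ultimas_posiciones = [-1] * 10
--     for i, valor in enumerate(columnas):
--         if ultimas_posiciones[valor] == -1:
--             jugadas = i + 1
--         else:
--             jugadas = i - ultimas_posiciones[valor]
--         if jugadas > 40: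
--             jugadas = 40 if jugadas % 2 == 0 else 39
--         caidas_columna.append(jugadas)
--         ultimas_posiciones[valor] = i
--     return caidas_columna
--
--
-- def obtener_siguiente_caidas(columnas):
--     # Group-by strategy: one pass builds, for every gap value, the ordered list of
--     # its capped successors; the answer is then a single dict lookup for the last gap.
--     caidas = obtener_historial_caidas(columnas)
--     groups = {}
--     for a, b in zip(caidas, caidas[1:]):
--         groups.setdefault(a, []).append(min(b, 40))
--     ultima_caida = caidas[-1]
--     return groups.get(ultima_caida, [])
-- ===== Notes on version B (the rewrite author's own statement) =====
-- stated objective: alternative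
-- what changed: Replaces A's scan that compares every gap with the last gap by a single group-by pass building a dict from each gap value to its ordered capped successors, followed by one lookup of the last gap.
import Mathlib
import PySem

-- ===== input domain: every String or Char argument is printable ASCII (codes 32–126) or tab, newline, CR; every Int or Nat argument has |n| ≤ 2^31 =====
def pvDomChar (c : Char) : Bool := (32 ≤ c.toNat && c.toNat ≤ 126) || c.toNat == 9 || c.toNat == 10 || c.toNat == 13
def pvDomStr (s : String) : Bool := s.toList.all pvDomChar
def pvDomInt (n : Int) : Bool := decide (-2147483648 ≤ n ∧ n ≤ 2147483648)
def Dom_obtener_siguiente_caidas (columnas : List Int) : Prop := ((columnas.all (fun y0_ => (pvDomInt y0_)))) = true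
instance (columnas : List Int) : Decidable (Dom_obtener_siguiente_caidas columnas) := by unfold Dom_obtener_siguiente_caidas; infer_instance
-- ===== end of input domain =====

-- B replaces A's compare-with-last scan by a group-by dict built in one pass plus a single
-- lookup (objective: alternative; same cost).

-- ===== PORT A =====
-- shared same-module helper, used verbatim by both Pythons
def obtener_historial_caidas (columnas : List Int) : List Int :=
  ((PySem.List.enumerate columnas 0).foldl
    (fun (st : List Int × List Int) (p : Int × Int) =>
      let i := p.1
      let valor := p.2
      -- ultimas_posiciones[valor]: exact under Pre_ (−10 ≤ valor < 10, so the index is in range)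
      let prev := PySem.List.pyGetD st.2 valor 0
      let jugadas := if prev == -1 then i + 1 else i - prev
      let jugadas := if jugadas > 40 then (if PySem.Int.mod jugadas 2 == 0 then (40:Int) else 39) else jugadas
      (st.1 ++ [jugadas], PySem.List.pySetD st.2 valor i))
    ([], List.replicate 10 (-1))).1

def obtener_siguiente_caidas (columnas : List Int) : List Int :=
  let caidas := obtener_historial_caidas columnas
  match PySem.List.pyGet? caidas (-1) with
  | none => []  -- Python raises IndexError here (empty input); excluded by Pre_
  | some ultima =>
    (PySem.List.pyRange 0 ((caidas.length : Int) - 1) 1).foldl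
      (fun acc i =>
        if PySem.List.pyGetD caidas i 0 == ultima then
          acc ++ [min (PySem.List.pyGetD caidas (i + 1) 0) 40]
        else acc) []

-- ===== PORT B =====
def obtener_siguiente_caidas_alt (columnas : List Int) : List Int :=
  let caidas := obtener_historial_caidas columnas
  let groups :=
    (caidas.zip (PySem.List.slice caidas (some 1) none)).foldl
      (fun (d : PySem.Dict Int (List Int)) p => d.modify p.1 [] (fun l => l ++ [min p.2 40]))
      PySem.Dict.empty
  match PySem.List.pyGet? caidas (-1) with
  | none => []  -- caidas[-1] raises IndexError in Python; excluded by Pre_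
  | some ultima => groups.getD ultima []

-- ===== PRECONDITION & SPEC =====
-- Pre_ excludes exactly the inputs where Python A raises IndexError: the empty list
-- (caidas[-1]) and any value outside -10..9 (ultimas_posiciones[valor]).
def Pre_obtener_siguiente_caidas (columnas : List Int) : Prop :=
  columnas ≠ [] ∧ ∀ v ∈ columnas, -10 ≤ v ∧ v < 10
instance (columnas : List Int) : Decidable (Pre_obtener_siguiente_caidas columnas) := by
  unfold Pre_obtener_siguiente_caidas; infer_instance
def pvWitness_obtener_siguiente_caidas : List Int := [1, 2, 1, 2, 1, 2]

def Spec_obtener_siguiente_caidas (columnas : List Int) (out : List Int) : Prop := out = obtener_siguiente_caidas_alt columnas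
instance (columnas : List Int) (out : List Int) : Decidable (Spec_obtener_siguiente_caidas columnas out) := by unfold Spec_obtener_siguiente_caidas; infer_instance

-- ===== CLAIM (what is proved, stated in full; the proofs are below) =====
def Claim_equal_obtener_siguiente_caidas : Prop := ∀ (columnas : List Int), Dom_obtener_siguiente_caidas columnas → Pre_obtener_siguiente_caidas columnas → Spec_obtener_siguiente_caidas columnas (obtener_siguiente_caidas columnas)

-- ===== LEMMAS AND PROOFS =====

-- invariant of B's group-by fold, for any single key q
theorem pv_groups_getD (ps : List (Int × Int)) (d : PySem.Dict Int (List Int)) (q : Int) :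
    (ps.foldl (fun (d : PySem.Dict Int (List Int)) p => d.modify p.1 [] (fun l => l ++ [min p.2 40])) d).getD q [] =
      d.getD q [] ++ (ps.filter (fun p => p.1 == q)).map (fun p => min p.2 40) := by
  induction ps generalizing d with
  | nil => simp
  | cons p ps ih =>
    simp only [List.foldl_cons, ih, List.filter_cons]
    by_cases h : p.1 = q
    · subst h
      simp [PySem.Dict.getD_modify_self]
    · have hb : (p.1 == q) = false := by simp [h]
      simp [hb, PySem.Dict.getD_modify, Ne.symm h]

-- A's index loop equals the filtered map over the zipped pairs (prefix form)
theorem pv_loopA_take (cs : List Int) (u : Int) (n : Nat) (hn : n ≤ cs.length - 1) :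
    (PySem.List.pyRange 0 (n : Int) 1).foldl
      (fun acc i =>
        if PySem.List.pyGetD cs i 0 == u then
          acc ++ [min (PySem.List.pyGetD cs (i + 1) 0) 40]
        else acc) [] =
    (((cs.zip cs.tail).take n).filter (fun p => p.1 == u)).map (fun p => min p.2 40) := by
  induction n with
  | zero => simp
  | succ n ih =>
    have hn' : n ≤ cs.length - 1 := by omega
    have hzl : (cs.zip cs.tail).length = cs.length - 1 := by
      simp
    have hlt : n < (cs.zip cs.tail).length := by omega
    have h1 : n < cs.length := by omega
    have h2 : n < cs.tail.length := by simp [List.length_tail]; omega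
    have h3 : n + 1 < cs.length := by omega
    have hcast : ((n : Int) + 1) = ((n + 1 : Nat) : Int) := by push_cast; ring
    rw [← hcast, PySem.List.pyRange_one_succ_right (Int.natCast_nonneg n), List.foldl_append,
        ih hn', List.take_add_one]
    have hget : (cs.zip cs.tail)[n]? = some ((cs.zip cs.tail)[n]'hlt) :=
      List.getElem?_eq_getElem hlt
    have hpair : (cs.zip cs.tail)[n]'hlt = (cs[n]'h1, cs[n + 1]'h3) := by
      rw [List.getElem_zip]
      exact congrArg _ (List.getElem_tail h2)
    rw [hget, hpair]
    have g1 : PySem.List.pyGetD cs (n : Int) 0 = cs[n]'h1 := by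
      rw [PySem.List.pyGetD_natCast]; exact List.getD_eq_getElem _ _ h1
    have g2 : PySem.List.pyGetD cs ((n : Int) + 1) 0 = cs[n + 1]'h3 := by
      rw [hcast, PySem.List.pyGetD_natCast]; exact List.getD_eq_getElem _ _ h3
    simp only [List.foldl_cons, List.foldl_nil, g1, g2, Option.toList_some, List.filter_append,
      List.map_append, List.filter_cons, List.filter_nil]
    by_cases h : cs[n]'h1 = u
    · simp [h]
    · simp [h]

theorem pv_len_historial (columnas : List Int) :
    (obtener_historial_caidas columnas).length = columnas.length := by
  unfold obtener_historial_caidas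
  suffices h : ∀ (xs : List Int) (s : Int) (st : List Int × List Int),
      ((PySem.List.enumerate xs s).foldl
        (fun (st : List Int × List Int) (p : Int × Int) =>
          let i := p.1
          let valor := p.2
          let prev := PySem.List.pyGetD st.2 valor 0
          let jugadas := if prev == -1 then i + 1 else i - prev
          let jugadas := if jugadas > 40 then (if PySem.Int.mod jugadas 2 == 0 then (40:Int) else 39) else jugadas
          (st.1 ++ [jugadas], PySem.List.pySetD st.2 valor i)) st).1.length
      = st.1.length + xs.length by
    rw [h columnas 0 ([], List.replicate 10 (-1))]; simp
  intro xs
  induction xs with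
  | nil => intro s st; simp [PySem.List.enumerate_nil]
  | cons x xs ih =>
    intro s st
    rw [PySem.List.enumerate_cons, List.foldl_cons, ih]
    simp
    omega

-- ===== VERDICT (by name: the statement is the Claim_ definition above) =====
theorem obtener_siguiente_caidas_spec : Claim_equal_obtener_siguiente_caidas := by
  intro columnas _ hpre
  unfold Spec_obtener_siguiente_caidas obtener_siguiente_caidas obtener_siguiente_caidas_alt
  dsimp only
  set c := obtener_historial_caidas columnas with hc
  have hcne : c ≠ [] := by
    intro h
    have hl := pv_len_historial columnas
    rw [← hc, h] at hl
    exact hpre.1 (List.length_eq_zero_iff.mp hl.symm)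
  have hpos : 1 ≤ c.length := List.length_pos_iff.mpr hcne
  cases hget : PySem.List.pyGet? c (-1) with
  | none => rfl
  | some u =>
    dsimp only
    have hzl : (c.zip c.tail).length = c.length - 1 := by
      simp
    have hcast : ((c.length : Int) - 1) = ((c.length - 1 : Nat) : Int) := by omega
    rw [hcast, pv_loopA_take c u (c.length - 1) le_rfl,
        pv_groups_getD, PySem.List.slice_from_one,
        List.take_of_length_le (le_of_eq hzl)]
    simp
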